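-- pv_equiv track=rewrite | github.com/jsw6872/TIL | coding_test/programmers/level_2/기능개발/my_solution.py | solution
-- ===== SOURCE A (Python) =====
-- def solution(progresses, speeds):
--     days = []
--
--     for progress, speed in zip(progresses, speeds):
--         count = 0
--         while (progress < 100) :
--             progress += speed
--             count += 1
--         days.append(count)
--
--     answer = []
--     count = 0
--     for i in days:
--         if i > count:
--             answer.append(1)
--             count = i
--         else:
--             answer[-1] += 1
--
--     return answer
-- ===== SOURCE B (Python) =====
-- def _group(days):
--     # recursive run-grouping: one group per leading maximum
--     if not days:
--         return []
--     k = 1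
--     while k < len(days) and days[k] <= days[0]:
--         k += 1
--     return [k] + _group(days[k:])
--
-- def solution(progresses, speeds):
--     days = [0 if p >= 100 else -((p - 100) // s) for p, s in zip(progresses, speeds)]
--     return _group(days)
-- ===== Notes on version B (the rewrite author's own statement) =====
-- stated objective: idiomatic
-- what changed: B replaces A's per-task simulation while-loop with a closed-form integer ceiling division -((p-100)//s) and replaces A's accumulator-with-mutable-last-element grouping pass with a recursive run-grouping that scans each group's extent with an index and slices the rest.
import Mathlib
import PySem

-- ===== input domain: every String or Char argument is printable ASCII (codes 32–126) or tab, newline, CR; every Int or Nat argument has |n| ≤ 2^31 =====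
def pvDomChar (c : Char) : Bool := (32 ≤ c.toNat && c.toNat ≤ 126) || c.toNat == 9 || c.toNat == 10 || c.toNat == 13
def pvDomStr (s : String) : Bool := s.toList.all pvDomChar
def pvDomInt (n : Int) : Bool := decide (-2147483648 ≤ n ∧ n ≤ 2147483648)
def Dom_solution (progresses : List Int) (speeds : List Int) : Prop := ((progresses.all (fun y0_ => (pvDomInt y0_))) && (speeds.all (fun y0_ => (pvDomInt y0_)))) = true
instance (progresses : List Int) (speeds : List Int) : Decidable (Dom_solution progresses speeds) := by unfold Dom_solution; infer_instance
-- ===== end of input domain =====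

-- B replaces A's day-by-day simulation with a closed-form ceiling division and A's
-- mutate-last-element grouping fold with a recursive run-grouping (idiomatic; not faster).

-- ===== PORT A =====
-- the inner 'while progress < 100: progress += speed; count += 1' loop; fuel
-- (100 - progress).toNat suffices whenever speed ≥ 1 (Pre_ guarantees this where the
-- loop runs; with speed ≤ 0 and progress < 100 the Python loop diverges, excluded by Pre_)
def solnWhile : Nat → Int → Int → Int → Int
  | 0, _, _, count => count
  | fuel + 1, progress, speed, count =>
      if progress < 100 then solnWhile fuel (progress + speed) speed (count + 1) else count

-- 'answer[-1] += 1' (Python raises IndexError on []; that input is outside Pre_)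
def incLast : List Int → List Int
  | [] => []
  | [x] => [x + 1]
  | x :: xs => x :: incLast xs

def solution (progresses : List Int) (speeds : List Int) : List Int :=
  let days := (progresses.zip speeds).foldl
    (fun days pq => days ++ [solnWhile (100 - pq.1).toNat pq.1 pq.2 0]) []
  (days.foldl
    (fun (st : List Int × Int) i =>
      if i > st.2 then (st.1 ++ [1], i) else (incLast st.1, st.2)) ([], 0)).1

-- ===== PORT B =====
-- '0 if p >= 100 else -((p - 100) // s)'
def ceilDays (p s : Int) : Int := if 100 ≤ p then 0 else -(PySem.Int.floordiv (p - 100) s)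

-- the inner 'while k < len(days) and days[k] <= days[0]: k += 1' scan (k - 1 over the tail)
def groupLen : Int → List Int → Nat
  | _, [] => 0
  | d, x :: xs => if x ≤ d then groupLen d xs + 1 else 0

-- '_group': [k] + _group(days[k:])
def groupB : List Int → List Int
  | [] => []
  | d :: rest =>
      ((groupLen d rest + 1 : Nat) : Int) :: groupB (rest.drop (groupLen d rest))
termination_by l => l.length
decreasing_by simp [List.length_drop]

def solution_alt (progresses : List Int) (speeds : List Int) : List Int :=
  groupB ((progresses.zip speeds).map (fun pq => ceilDays pq.1 pq.2))

-- ===== PRECONDITION & SPEC =====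
-- Pre_ excludes exactly the inputs where A does not return: a zipped pair with
-- progress < 100 and speed ≤ 0 (the while loop never terminates), and a first zipped
-- pair with progress ≥ 100 (first day 0, so 'answer[-1] += 1' raises IndexError on []).
def Pre_solution (progresses : List Int) (speeds : List Int) : Prop :=
  (∀ q ∈ progresses.zip speeds, q.1 < 100 → 1 ≤ q.2) ∧
  (∀ q ∈ (progresses.zip speeds).take 1, q.1 < 100)
instance (progresses : List Int) (speeds : List Int) : Decidable (Pre_solution progresses speeds) := by
  unfold Pre_solution; infer_instance

def pvWitness_solution : List Int × List Int := ([93, 30, 55], [1, 30, 5])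

def Spec_solution (progresses : List Int) (speeds : List Int) (out : List Int) : Prop := out = solution_alt progresses speeds
instance (progresses : List Int) (speeds : List Int) (out : List Int) : Decidable (Spec_solution progresses speeds out) := by unfold Spec_solution; infer_instance

-- ===== CLAIM (what is proved, stated in full; the proofs are below) =====
def Claim_equal_solution : Prop := ∀ (progresses : List Int) (speeds : List Int), Dom_solution progresses speeds → Pre_solution progresses speeds → Spec_solution progresses speeds (solution progresses speeds)

-- ===== LEMMAS AND PROOFS =====

@[simp] lemma groupB_nil : groupB [] = [] := by rw [groupB.eq_def]

lemma groupB_cons (d : Int) (rest : List Int) :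
    groupB (d :: rest)
      = ((groupLen d rest + 1 : Nat) : Int) :: groupB (rest.drop (groupLen d rest)) := by
  rw [groupB.eq_def]

lemma incLast_append (a : List Int) (m : Int) : incLast (a ++ [m]) = a ++ [m + 1] := by
  induction a with
  | nil => simp [incLast]
  | cons x xs ih =>
      cases xs with
      | nil => simp [incLast]
      | cons y ys => simpa [incLast] using ih

-- the simulated while loop equals the closed form, given enough fuel and speed ≥ 1
lemma solnWhile_eq (s : Int) (hs : 1 ≤ s) :
    ∀ (fuel : Nat) (p c : Int), (100 - p).toNat ≤ fuel →
      solnWhile fuel p s c = c + ceilDays p s := by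
  intro fuel
  induction fuel with
  | zero =>
      intro p c h
      have hp : 100 ≤ p := by omega
      simp [solnWhile, ceilDays, hp]
  | succ fuel ih =>
      intro p c h
      by_cases hp : p < 100
      · have hfuel : (100 - (p + s)).toNat ≤ fuel := by omega
        have hrec := ih (p + s) (c + 1) hfuel
        rw [solnWhile, if_pos hp, hrec]
        have hspos : (0 : Int) < s := by omega
        have e2 : ceilDays p s = -(PySem.Int.floordiv (p - 100) s) := by
          simp [ceilDays, show ¬ (100 : Int) ≤ p by omega]
        by_cases hdone : 100 ≤ p + s
        · -- last iteration: floordiv (p-100) s = -1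
          have hfd : PySem.Int.floordiv (p - 100) s = -1 := by
            rw [PySem.Int.floordiv_eq_iff_of_pos hspos]
            constructor <;> nlinarith
          have e1 : ceilDays (p + s) s = 0 := by simp [ceilDays, hdone]
          rw [e1, e2, hfd]; ring
        · have e1 : ceilDays (p + s) s = -(PySem.Int.floordiv (p + s - 100) s) := by
            simp [ceilDays, hdone]
          obtain ⟨hb1, hb2⟩ := (PySem.Int.floordiv_eq_iff_of_pos (a := p + s - 100) hspos).mp rfl
          have hfd : PySem.Int.floordiv (p - 100) s = PySem.Int.floordiv (p + s - 100) s - 1 := by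
            rw [PySem.Int.floordiv_eq_iff_of_pos hspos]
            constructor <;> nlinarith
          rw [e1, e2, hfd]; ring
      · simp [solnWhile, ceilDays, hp, (by omega : (100 : Int) ≤ p)]

-- phase 1: A's foldl-append days list is the map of the closed form
lemma days_eq (L : List (Int × Int)) (hL : ∀ q ∈ L, q.1 < 100 → 1 ≤ q.2) :
    ∀ acc : List Int,
      L.foldl (fun days pq => days ++ [solnWhile (100 - pq.1).toNat pq.1 pq.2 0]) acc
        = acc ++ L.map (fun pq => ceilDays pq.1 pq.2) := by
  induction L with
  | nil => intro acc; simp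
  | cons q L ih =>
      intro acc
      have hq : solnWhile (100 - q.1).toNat q.1 q.2 0 = ceilDays q.1 q.2 := by
        by_cases hp : q.1 < 100
        · have hs : 1 ≤ q.2 := hL q (by simp) hp
          simpa using solnWhile_eq q.2 hs _ q.1 0 le_rfl
        · have : (100 - q.1).toNat = 0 := by omega
          simp [this, solnWhile, ceilDays, (by omega : (100 : Int) ≤ q.1)]
      have hL' : ∀ p ∈ L, p.1 < 100 → 1 ≤ p.2 := fun p hp => hL p (by simp [hp])
      simp only [List.foldl_cons, List.map_cons, hq, ih hL']
      simp

-- phase 2 invariant: A's grouping fold on (a ++ [m], d) finishes the current group with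
-- groupLen d rest more members and then behaves as B's recursive grouping on the rest
lemma foldl_group (rest : List Int) :
    ∀ (a : List Int) (m d : Int),
      (rest.foldl
        (fun (st : List Int × Int) i =>
          if i > st.2 then (st.1 ++ [1], i) else (incLast st.1, st.2)) (a ++ [m], d)).1
        = a ++ (m + (groupLen d rest : Int)) :: groupB (rest.drop (groupLen d rest)) := by
  induction rest with
  | nil => intro a m d; simp [groupLen]
  | cons x xs ih =>
      intro a m d
      rw [List.foldl_cons]
      by_cases hx : x ≤ d
      · have hk : groupLen d (x :: xs) = groupLen d xs + 1 := by simp [groupLen, hx]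
        rw [if_neg (by omega), incLast_append, ih a (m + 1) d, hk, List.drop_succ_cons]
        congr 2
        push_cast
        ring
      · have hk : groupLen d (x :: xs) = 0 := by simp [groupLen, hx]
        rw [if_pos (by omega : x > d), ih (a ++ [m]) 1 x, hk]
        simp only [Nat.cast_zero, add_zero, List.drop_zero, groupB_cons,
          List.append_assoc, List.cons_append, List.nil_append]
        congr 3
        push_cast
        ring

theorem solution_spec_aux (progresses speeds : List Int)
    (hpre : Pre_solution progresses speeds) :
    solution progresses speeds = solution_alt progresses speeds := by
  obtain ⟨h1, h2⟩ := hpre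
  unfold solution solution_alt
  rw [days_eq _ h1 []]
  simp only [List.nil_append]
  cases hL : (progresses.zip speeds).map (fun pq => ceilDays pq.1 pq.2) with
  | nil => simp
  | cons d rest =>
      -- the first day is positive
      have hd : 0 < d := by
        cases hz : progresses.zip speeds with
        | nil => rw [hz] at hL; simp at hL
        | cons q L =>
            rw [hz] at hL
            simp only [List.map_cons, List.cons.injEq] at hL
            have hq1 : q.1 < 100 := h2 q (by simp [hz])
            have hq2 : 1 ≤ q.2 := h1 q (by simp [hz]) hq1
            have hspos : (0 : Int) < q.2 := by omega
            have hneg : PySem.Int.floordiv (q.1 - 100) q.2 < 0 :=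
              (PySem.Int.floordiv_lt_iff_lt_mul hspos).mpr (by omega)
            rw [← hL.1]
            simp [ceilDays]
            omega
      rw [show List.foldl
            (fun (st : List Int × Int) i =>
              if i > st.2 then (st.1 ++ [1], i) else (incLast st.1, st.2))
            ([], 0) (d :: rest)
          = List.foldl
            (fun (st : List Int × Int) i =>
              if i > st.2 then (st.1 ++ [1], i) else (incLast st.1, st.2))
            ([1], d) rest from by
        simp [List.foldl_cons, show d > (0 : Int) from hd]]
      have hfg := foldl_group rest [] 1 d
      simp only [List.nil_append] at hfg
      rw [hfg, groupB_cons]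
      congr 2
      push_cast; ring

-- ===== VERDICT (by name: the statement is the Claim_ definition above) =====
theorem solution_spec : Claim_equal_solution := by
  intro progresses speeds _ hpre
  exact solution_spec_aux progresses speeds hpre
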